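-- pv_equiv track=rewrite | github.com/F1gueron/Design-and-Analysis-of-Algorithms | Examenes/BaileTikTok.py | bfsAux
-- ===== SOURCE A (Python) =====
-- from collections import deque
--
-- def bfsAux(g, visited,m):
--     q = deque()
--     depth = 1
--     q.append((0,depth))
--     visited[0] = True
--     sol = 1
--     while q:
--         aux, depth = q.popleft()
--         if depth < m:
--             for adjs in g[aux]:
--                 if not visited[adjs]:
--                     q.append((adjs,depth+1))
--                     visited[adjs] = True
--                     sol+=1
--     return sol
-- ===== SOURCE B (Python) =====
-- def bfsAux(g, visited, m):
--     # Level-synchronized BFS: walk one whole depth level at a time.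
--     # Mutates 'visited' in place exactly like A does.
--     visited[0] = True
--     frontier = [0]
--     sol = 1
--     depth = 1
--     while frontier and depth < m:
--         nxt = []
--         for u in frontier:
--             for v in g[u]:
--                 if not visited[v]:
--                     visited[v] = True
--                     nxt.append(v)
--         sol += len(nxt)
--         frontier = nxt
--         depth += 1
--     return sol
-- ===== Notes on version B (the rewrite author's own statement) =====
-- stated objective: simpler
-- what changed: Replaces the depth-tagged deque BFS by a level-synchronized BFS that loops over whole levels with a plain frontier list, so no (node, depth) pairs are queued or unpacked.
-- outside the precondition, e.g. on bfsAux([[0], [5]], [False, False], 2): A returns 1, B returns 1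
import Mathlib
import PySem

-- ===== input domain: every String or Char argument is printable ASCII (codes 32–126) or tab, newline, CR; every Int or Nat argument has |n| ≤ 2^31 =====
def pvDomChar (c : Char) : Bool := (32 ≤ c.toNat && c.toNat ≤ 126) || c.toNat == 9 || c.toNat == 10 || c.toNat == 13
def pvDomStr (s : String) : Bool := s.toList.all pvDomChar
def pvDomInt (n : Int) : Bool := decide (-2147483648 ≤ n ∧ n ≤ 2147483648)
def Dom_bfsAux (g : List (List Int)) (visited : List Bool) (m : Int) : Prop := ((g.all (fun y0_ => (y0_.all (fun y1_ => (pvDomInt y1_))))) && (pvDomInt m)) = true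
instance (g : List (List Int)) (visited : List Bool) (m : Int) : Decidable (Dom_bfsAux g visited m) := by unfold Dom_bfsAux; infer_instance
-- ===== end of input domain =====

-- B replaces A's depth-tagged deque BFS by a level-synchronized BFS (loop over levels with a plain
-- frontier list); objective: simpler decomposition, same O(V+E) cost. Both A and B mutate the
-- Python list 'visited' in place in the same way; the equivalence proved here is about the return value.

-- ===== PORT A =====
-- per-neighbor body of A's inner 'for adjs in g[aux]' loop; state = (queue, visited, sol), d = depth+1
def bfsAuxStepA (d : Int) (st : List (Int × Int) × List Bool × Int) (v : Int) : List (Int × Int) × List Bool × Int :=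
  if PySem.List.pyGetD st.2.1 v true then st
  else (st.1 ++ [(v, d)], PySem.List.pySetD st.2.1 v true, st.2.2 + 1)

-- auxiliary: setting a False entry to True lowers the False-count by one
theorem count_false_set (xs : List Bool) (k : Nat) (he : xs[k]? = some false) :
    (xs.set k true).count false + 1 = xs.count false := by
  induction xs generalizing k with
  | nil => simp at he
  | cons x xs ih =>
    cases k with
    | zero =>
      have hx : x = false := by simpa using he
      simp [hx]
    | succ k =>
      simp only [List.set_cons_succ, List.count_cons]
      have := ih k (by simpa using he)
      split <;> omega

-- termination measure bookkeeping for A's while loop (cited by 'decreasing_by' below)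
theorem bfsAuxStepA_mu (d : Int) (ns : List Int) (st : List (Int × Int) × List Bool × Int) :
    2 * (ns.foldl (bfsAuxStepA d) st).2.1.count false + (ns.foldl (bfsAuxStepA d) st).1.length ≤
      2 * st.2.1.count false + st.1.length := by
  induction ns generalizing st with
  | nil => simp
  | cons v ns ih =>
    simp only [List.foldl_cons]
    refine le_trans (ih _) ?_
    unfold bfsAuxStepA
    split
    · exact le_rfl
    · rename_i h
      rw [Bool.not_eq_true] at h
      rcases hk : PySem.List.pyIdx? st.2.1.length v with _ | k
      · simp only [PySem.List.pyGetD, PySem.List.pyGet?, hk, Option.bind_none, Option.getD_none] at h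
        exact absurd h (by decide)
      · simp only [PySem.List.pyGetD, PySem.List.pyGet?, PySem.List.pySetD, PySem.List.pySet?,
          hk, Option.bind_some, Option.map_some, Option.getD_some] at h ⊢
        rcases he : st.2.1[k]? with _ | b
        · simp [he] at h
        · have hb : b = false := by simp [he] at h; exact h
          subst hb
          have hc := count_false_set st.2.1 k he
          simp only [List.length_append, List.length_cons, List.length_nil]
          omega

-- A's 'while q' loop, literal: pop front, if depth < m fold A's inner loop over g[aux]
def bfsAuxLoop (g : List (List Int)) (m : Int) : List (Int × Int) → List Bool → Int → Int
  | [], _, sol => sol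
  | (aux, depth) :: rest, vis, sol =>
    if depth < m then
      let st := (PySem.List.pyGetD g aux []).foldl (bfsAuxStepA (depth + 1)) (rest, vis, sol)
      bfsAuxLoop g m st.1 st.2.1 st.2.2
    else bfsAuxLoop g m rest vis sol
termination_by q vis _ => 2 * vis.count false + q.length
decreasing_by
  · have h := bfsAuxStepA_mu (depth + 1) (PySem.List.pyGetD g aux []) (rest, vis, sol)
    dsimp only at h
    simp only [List.length_cons]
    omega
  · simp only [List.length_cons]
    omega

def bfsAux (g : List (List Int)) (visited : List Bool) (m : Int) : Int :=
  bfsAuxLoop g m [((0 : Int), (1 : Int))] (PySem.List.pySetD visited 0 true) 1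

-- ===== PORT B =====
-- per-neighbor body of B's inner loop; state = (next frontier, visited)
def bfsAuxStepB (st : List Int × List Bool) (v : Int) : List Int × List Bool :=
  if PySem.List.pyGetD st.2 v true then st
  else (st.1 ++ [v], PySem.List.pySetD st.2 v true)

-- B's 'for u in frontier' loop body
def bfsAuxExpandB (g : List (List Int)) (st : List Int × List Bool) (u : Int) : List Int × List Bool :=
  (PySem.List.pyGetD g u []).foldl bfsAuxStepB st

-- B's 'while frontier and depth < m' loop: fuel = number of remaining levels (m - depth)
def bfsAuxLevel (g : List (List Int)) : Nat → List Int → List Bool → Int → Int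
  | 0, _, _, sol => sol
  | k + 1, frontier, vis, sol =>
    if frontier.isEmpty then sol
    else
      let st := frontier.foldl (bfsAuxExpandB g) ([], vis)
      bfsAuxLevel g k st.1 st.2 (sol + st.1.length)

def bfsAux_alt (g : List (List Int)) (visited : List Bool) (m : Int) : Int :=
  bfsAuxLevel g (m - 1).toNat [0] (PySem.List.pySetD visited 0 true) 1

-- ===== PRECONDITION & SPEC =====
-- Pre_ excludes the inputs on which Python A raises IndexError (empty 'visited', or an adjacency
-- entry out of range of 'visited' or of 'g' when m > 1). Which out-of-range entries A actually
-- reaches depends on BFS reachability within depth m, which is not closed-form, so Pre_ is the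
-- conservative closed-form over-approximation "every entry of g is in range"; it thereby also
-- excludes some inputs whose malformed rows are never reached and on which A returns (see cites).
def Pre_bfsAux (g : List (List Int)) (visited : List Bool) (m : Int) : Prop :=
  visited ≠ [] ∧
    (1 < m → g ≠ [] ∧ ∀ row ∈ g, ∀ v ∈ row,
      (-(visited.length : Int) ≤ v ∧ v < visited.length) ∧ (-(g.length : Int) ≤ v ∧ v < g.length))
instance (g : List (List Int)) (visited : List Bool) (m : Int) : Decidable (Pre_bfsAux g visited m) := by
  unfold Pre_bfsAux; infer_instance

def pvWitness_bfsAux : List (List Int) × List Bool × Int :=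
  ([[1, 2], [0, 2], [3], []], [false, false, false, false], 3)

def Spec_bfsAux (g : List (List Int)) (visited : List Bool) (m : Int) (out : Int) : Prop := out = bfsAux_alt g visited m
instance (g : List (List Int)) (visited : List Bool) (m : Int) (out : Int) : Decidable (Spec_bfsAux g visited m out) := by unfold Spec_bfsAux; infer_instance

-- ===== CLAIM (what is proved, stated in full; the proofs are below) =====
def Claim_equal_bfsAux : Prop := ∀ (g : List (List Int)) (visited : List Bool) (m : Int), Dom_bfsAux g visited m → Pre_bfsAux g visited m → Spec_bfsAux g visited m (bfsAux g visited m)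

-- ===== LEMMAS AND PROOFS =====

theorem bfsAuxLoop_nil (g : List (List Int)) (m : Int) (vis : List Bool) (sol : Int) :
    bfsAuxLoop g m [] vis sol = sol := by
  rw [bfsAuxLoop]

theorem bfsAuxLoop_cons_lt (g : List (List Int)) (m aux depth : Int) (rest : List (Int × Int))
    (vis : List Bool) (sol : Int) (h : depth < m) :
    bfsAuxLoop g m ((aux, depth) :: rest) vis sol =
      (fun st => bfsAuxLoop g m st.1 st.2.1 st.2.2)
        ((PySem.List.pyGetD g aux []).foldl (bfsAuxStepA (depth + 1)) (rest, vis, sol)) := by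
  rw [bfsAuxLoop]; simp [h]

theorem bfsAuxLoop_cons_ge (g : List (List Int)) (m aux depth : Int) (rest : List (Int × Int))
    (vis : List Bool) (sol : Int) (h : ¬ depth < m) :
    bfsAuxLoop g m ((aux, depth) :: rest) vis sol = bfsAuxLoop g m rest vis sol := by
  rw [bfsAuxLoop]; simp [h]

-- A's inner neighbour fold tracked against B's: queue tail and sol are determined by B's next frontier
theorem fold_stepA_eq (d : Int) (ns : List Int) (pre : List (Int × Int)) (nxt : List Int)
    (vis : List Bool) (s0 : Int) :
    ns.foldl (bfsAuxStepA d) (pre ++ nxt.map (fun v => (v, d)), vis, s0 + nxt.length) =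
      (pre ++ (ns.foldl bfsAuxStepB (nxt, vis)).1.map (fun v => (v, d)),
        (ns.foldl bfsAuxStepB (nxt, vis)).2,
        s0 + (ns.foldl bfsAuxStepB (nxt, vis)).1.length) := by
  induction ns generalizing nxt vis with
  | nil => simp
  | cons v ns ih =>
    simp only [List.foldl_cons]
    by_cases h : PySem.List.pyGetD vis v true
    · simp only [bfsAuxStepA, bfsAuxStepB, h, if_pos]
      exact ih nxt vis
    · simp only [bfsAuxStepA, bfsAuxStepB, h, if_neg, Bool.false_eq_true, not_false_iff]
      have h1 : (pre ++ nxt.map (fun v => (v, d)), vis, s0 + (nxt.length : Int)).1 ++ [(v, d)] =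
          pre ++ (nxt ++ [v]).map (fun v => (v, d)) := by simp
      have := ih (nxt ++ [v]) (PySem.List.pySetD vis v true)
      simp only [List.length_append, List.length_cons, List.length_nil] at this ⊢
      rw [h1]
      convert this using 3
      push_cast
      ring_nf

-- processing one whole level of A's queue equals B's frontier expansion
theorem level_eq (g : List (List Int)) (m d : Int) (hd : d < m) (front : List Int) :
    ∀ (nxt : List Int) (vis : List Bool) (s0 : Int),
    bfsAuxLoop g m (front.map (fun u => (u, d)) ++ nxt.map (fun v => (v, d + 1))) vis
        (s0 + nxt.length) =
      bfsAuxLoop g m ((front.foldl (bfsAuxExpandB g) (nxt, vis)).1.map (fun v => (v, d + 1)))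
        (front.foldl (bfsAuxExpandB g) (nxt, vis)).2
        (s0 + (front.foldl (bfsAuxExpandB g) (nxt, vis)).1.length) := by
  induction front with
  | nil => intro nxt vis s0; simp
  | cons u front ih =>
    intro nxt vis s0
    simp only [List.map_cons, List.cons_append, List.foldl_cons]
    rw [bfsAuxLoop_cons_lt g m u d _ vis _ hd]
    have hf := fold_stepA_eq (d + 1) (PySem.List.pyGetD g u []) (front.map (fun u => (u, d)))
      nxt vis s0
    simp only at hf
    rw [hf]
    exact ih _ _ s0

-- entries at depth ≥ m are drained without effect
theorem drain_eq (g : List (List Int)) (m : Int) (l : List Int) :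
    ∀ (vis : List Bool) (sol : Int),
    bfsAuxLoop g m (l.map (fun u => (u, m))) vis sol = sol := by
  induction l with
  | nil => intro vis sol; exact bfsAuxLoop_nil g m vis sol
  | cons u l ih =>
    intro vis sol
    simp only [List.map_cons]
    rw [bfsAuxLoop_cons_ge g m u m _ vis sol (lt_irrefl m)]
    exact ih vis sol

-- the main correspondence: A's queue BFS with k levels of budget left equals B's level BFS on fuel k
theorem main_eq (g : List (List Int)) (m : Int) :
    ∀ (k : Nat) (frontier : List Int) (vis : List Bool) (sol : Int),
    bfsAuxLoop g m (frontier.map (fun u => (u, m - (k : Int)))) vis sol =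
      bfsAuxLevel g k frontier vis sol := by
  intro k
  induction k with
  | zero =>
    intro frontier vis sol
    simpa using drain_eq g m frontier vis sol
  | succ k ih =>
    intro frontier vis sol
    by_cases he : frontier.isEmpty
    · rw [List.isEmpty_iff.mp he]
      simp [bfsAuxLevel, bfsAuxLoop_nil]
    · have hd : m - ((k : Int) + 1) < m := by omega
      have hl := level_eq g m (m - ((k : Int) + 1)) hd frontier [] vis sol
      have harith : m - ((k : Int) + 1) + 1 = m - (k : Int) := by omega
      simp only [List.map_nil, List.append_nil, List.length_nil, Int.natCast_zero, add_zero,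
        harith] at hl
      have : ((k : Nat) + 1 : Nat) = k + 1 := rfl
      rw [bfsAuxLevel]
      simp only [he, if_neg, Bool.false_eq_true, not_false_iff]
      have hcast : (m - ((k + 1 : Nat) : Int)) = m - ((k : Int) + 1) := by push_cast; omega
      rw [hcast, hl]
      exact ih _ _ _

-- ===== VERDICT (by name: the statement is the Claim_ definition above) =====
theorem bfsAux_spec : Claim_equal_bfsAux := by
  intro g visited m _ _
  unfold Spec_bfsAux bfsAux bfsAux_alt
  by_cases hm : 1 ≤ m
  · have hk : ((m - 1).toNat : Int) = m - 1 := Int.toNat_of_nonneg (by omega)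
    have := main_eq g m (m - 1).toNat [0] (PySem.List.pySetD visited 0 true) 1
    rw [hk] at this
    have harith : m - (m - 1) = 1 := by omega
    rw [harith] at this
    simpa using this
  · have hk : (m - 1).toNat = 0 := by omega
    rw [hk]
    rw [bfsAuxLoop_cons_ge g m 0 1 [] _ 1 (by omega)]
    rw [bfsAuxLoop_nil, bfsAuxLevel]
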